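-- pv_equiv track=rewrite | github.com/hyungmogu/algorithm-exercises | Programmers/1_비밀지도/main.py | convert_decimal_to_hash_and_spaces
-- ===== SOURCE A (Python) =====
-- def convert_decimal_to_hash_and_spaces(decimal_number,n):
--     result = ""
--
--     i = 0
--     while i < n:
--         if ((decimal_number >> i) & 1) == 0:
--             result = " " + result
--         else:
--             result = "#" + result
--         i += 1
--     return result
-- ===== SOURCE B (Python) =====
-- def convert_decimal_to_hash_and_spaces(decimal_number, n):
--     if n <= 0:
--         return ""
--     mask = decimal_number % (1 << n)
--     s = format(mask, '0{}b'.format(n))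
--     return s.translate({ord('1'): '#', ord('0'): ' '})
-- ===== Notes on version B (the rewrite author's own statement) =====
-- stated objective: faster
-- what changed: Replaces A's per-bit while loop that prepends one character at a time (quadratic string building) by mask-then-format: one modulo captures the low n bits, format renders them as a fixed-width binary string, and a translation maps '1'/'0' to '#'/' '.
import Mathlib
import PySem

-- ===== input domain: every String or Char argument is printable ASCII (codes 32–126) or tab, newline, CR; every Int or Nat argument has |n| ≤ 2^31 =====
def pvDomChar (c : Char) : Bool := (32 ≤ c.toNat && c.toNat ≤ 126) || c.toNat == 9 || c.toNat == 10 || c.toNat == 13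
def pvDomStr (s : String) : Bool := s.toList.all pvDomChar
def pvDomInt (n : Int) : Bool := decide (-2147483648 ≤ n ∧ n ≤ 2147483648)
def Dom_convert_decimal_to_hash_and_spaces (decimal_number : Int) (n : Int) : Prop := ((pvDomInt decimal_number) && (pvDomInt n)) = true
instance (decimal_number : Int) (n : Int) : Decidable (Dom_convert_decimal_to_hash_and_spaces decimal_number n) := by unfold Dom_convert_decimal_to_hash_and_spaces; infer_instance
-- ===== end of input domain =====

-- B replaces A's per-bit while loop (which prepends one character at a time, rebuilding the string
-- each step) by mask-then-format: one modulo captures the low n bits, rendered as a fixed-width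
-- binary string whose digits are translated to '#'/' ' (objective: faster, measured).

-- ===== PORT A =====
-- the while loop: state (i, result); result is prepended to one char per bit
-- (the shift amount is i.toNat: i starts at 0 and only increases, so i ≥ 0 in every reachable state)
def pvAgo (d : Int) (n : Int) (i : Int) (result : List Char) : List Char :=
  if i < n then
    pvAgo d n (i + 1)
      ((if PySem.Int.band (d >>> i.toNat) 1 == 0 then ' ' else '#') :: result)
  else result
termination_by (n - i).toNat
decreasing_by omega

def convert_decimal_to_hash_and_spaces (decimal_number : Int) (n : Int) : String :=
  String.ofList (pvAgo decimal_number n 0 [])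

-- ===== PORT B =====
-- binary digits of a positive Nat, most significant first (format(m, 'b') is this, with ['0'] for 0)
def pvBbin : Nat → List Char
  | 0 => []
  | m + 1 => pvBbin ((m + 1) / 2) ++ [if (m + 1) % 2 == 1 then '1' else '0']
decreasing_by omega

-- format(m, '0{w}b') for m ≥ 0: binary digits, zero-padded on the left to width w
def pvBfmt (m : Nat) (w : Nat) : List Char :=
  List.replicate (w - (if m = 0 then ['0'] else pvBbin m).length) '0'
    ++ (if m = 0 then ['0'] else pvBbin m)

def convert_decimal_to_hash_and_spaces_alt (decimal_number : Int) (n : Int) : String :=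
  if n ≤ 0 then "" else
    let mask := (PySem.Int.mod decimal_number ((1 : Int) <<< n.toNat)).toNat
    String.ofList ((pvBfmt mask n.toNat).map (fun c => if c == '1' then '#' else ' '))

-- ===== PRECONDITION & SPEC =====
def Spec_convert_decimal_to_hash_and_spaces (decimal_number : Int) (n : Int) (out : String) : Prop := out = convert_decimal_to_hash_and_spaces_alt decimal_number n
instance (decimal_number : Int) (n : Int) (out : String) : Decidable (Spec_convert_decimal_to_hash_and_spaces decimal_number n out) := by unfold Spec_convert_decimal_to_hash_and_spaces; infer_instance

-- ===== CLAIM (what is proved, stated in full; the proofs are below) =====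
def Claim_equal_convert_decimal_to_hash_and_spaces : Prop := ∀ (decimal_number : Int) (n : Int), Dom_convert_decimal_to_hash_and_spaces decimal_number n → Spec_convert_decimal_to_hash_and_spaces decimal_number n (convert_decimal_to_hash_and_spaces decimal_number n)

-- ===== LEMMAS AND PROOFS =====

-- the characters A's loop produces from position i on (accumulator removed)
def pvAchars (d : Int) (n : Int) (i : Int) : List Char :=
  if i < n then
    pvAchars d n (i + 1) ++ [if PySem.Int.band (d >>> i.toNat) 1 == 0 then ' ' else '#']
  else []
termination_by (n - i).toNat
decreasing_by omega

-- the same characters as a recursion over the remaining width w and the shifted value e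
def pvH : Nat → Int → List Char
  | 0, _ => []
  | w + 1, e => pvH w (e >>> (1:Nat)) ++ [if PySem.Int.band e 1 == 0 then ' ' else '#']

-- width-w binary digits (MSB first) of m, i.e. of m mod 2^w
def pvG : Nat → Nat → List Char
  | 0, _ => []
  | w + 1, m => pvG w (m / 2) ++ [if m % 2 == 1 then '1' else '0']

theorem pvAgo_eq (d n i : Int) (acc : List Char) :
    pvAgo d n i acc = pvAchars d n i ++ acc := by
  rw [pvAgo, pvAchars]
  by_cases h : i < n
  · simp only [h, if_true]
    rw [pvAgo_eq d n (i + 1)]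
    simp
  · simp [h]
termination_by (n - i).toNat
decreasing_by omega

theorem pvAchars_eq_H (d n i : Int) (hi : 0 ≤ i) :
    pvAchars d n i = pvH (n - i).toNat (d >>> i.toNat) := by
  rw [pvAchars]
  by_cases h : i < n
  · simp only [h, if_true]
    have hw : (n - i).toNat = (n - (i + 1)).toNat + 1 := by omega
    rw [hw, pvH, pvAchars_eq_H d n (i + 1) (by omega)]
    have hsh : d >>> (i + 1).toNat = (d >>> i.toNat) >>> (1:Nat) := by
      have h1 : (i + 1).toNat = i.toNat + 1 := by omega
      rw [h1, Int.shiftRight_add]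
    rw [hsh]

  · simp only [h, if_false]
    have : (n - i).toNat = 0 := by omega
    rw [this, pvH]
termination_by (n - i).toNat
decreasing_by omega

-- halving the value halves the low-bits residue
theorem pvMod_half (e p : Int) (hp : 0 < p) :
    (e >>> (1:Nat)) % p = (e % (2 * p)) / 2 := by
  have h2p : (0 : Int) < 2 * p := by omega
  have hsh : e >>> (1 : Nat) = e / 2 := by
    rw [Int.shiftRight_eq_div_pow]; norm_num
  have hdec : e = e % (2 * p) + (2 * p) * (e / (2 * p)) := (Int.emod_add_mul_ediv e (2 * p)).symm
  have hr0 : 0 ≤ e % (2 * p) := Int.emod_nonneg e (by omega)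
  have hr1 : e % (2 * p) < 2 * p := Int.emod_lt_of_pos e h2p
  rw [hsh]
  conv_lhs => rw [hdec]
  have : (e % (2 * p) + 2 * p * (e / (2 * p))) / 2
      = e % (2 * p) / 2 + p * (e / (2 * p)) := by
    have : 2 * p * (e / (2 * p)) = p * (e / (2 * p)) * 2 := by ring
    rw [this, Int.add_mul_ediv_right _ _ (by norm_num : (2:Int) ≠ 0)]
  rw [this, Int.add_mul_emod_self_left]
  exact Int.emod_eq_of_lt (by omega) (by omega)

theorem pvH_eq (w : Nat) (e : Int) :
    pvH w e = (pvG w (PySem.Int.mod e (2 ^ w)).toNat).map (fun c => if c == '1' then '#' else ' ') := by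
  induction w generalizing e with
  | zero => rfl
  | succ w ih =>
    have hp : (0 : Int) < 2 ^ w := by positivity
    have hp' : (0 : Int) < 2 ^ (w + 1) := by positivity
    have hmod : PySem.Int.mod e (2 ^ (w + 1)) = e % 2 ^ (w + 1) :=
      PySem.Int.mod_eq_emod_of_pos hp'
    have hmod' : PySem.Int.mod (e >>> (1:Nat)) (2 ^ w) = (e >>> (1:Nat)) % 2 ^ w :=
      PySem.Int.mod_eq_emod_of_pos hp
    set r : Int := e % 2 ^ (w + 1) with hr
    have hr0 : 0 ≤ r := Int.emod_nonneg e (by omega)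
    have hhalf : (e >>> (1:Nat)) % 2 ^ w = r / 2 := by
      have := pvMod_half e (2 ^ w) hp
      rwa [show (2 : Int) * 2 ^ w = 2 ^ (w + 1) by ring] at this
    rw [pvH, pvG, ih (e >>> (1:Nat)), hmod, hmod', hhalf]
    have hdivNat : (r / 2).toNat = r.toNat / 2 := by omega
    have hbit : PySem.Int.band e 1 = (r.toNat % 2 : Nat) := by
      rw [PySem.Int.band_one, PySem.Int.mod_eq_emod_of_pos (by norm_num : (0:Int) < 2)]
      have h2 : e % 2 = r % 2 := by
        rw [hr]
        rw [Int.emod_emod_of_dvd e ⟨2 ^ w, by ring⟩]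
      omega
    rw [List.map_append, hdivNat]
    congr 1
    simp only [List.map_cons, List.map_nil]
    have : (PySem.Int.band e 1 == 0) = (r.toNat % 2 != 1) := by
      rw [hbit]
      rcases Nat.mod_two_eq_zero_or_one r.toNat with h | h <;> simp [h]
    rw [this]
    rcases Nat.mod_two_eq_zero_or_one r.toNat with h | h <;> simp [h]

theorem pvG_zero (w : Nat) : pvG w 0 = List.replicate w '0' := by
  induction w with
  | zero => rfl
  | succ w ih => rw [pvG]; simp [ih, List.replicate_succ']

theorem pvBbin_pad (w m : Nat) (hm : m < 2 ^ w) :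
    List.replicate (w - (pvBbin m).length) '0' ++ pvBbin m = pvG w m := by
  induction w generalizing m with
  | zero =>
    have h : m = 0 := by omega
    subst h; simp [pvBbin, pvG]
  | succ w ih =>
    cases m with
    | zero => simp [pvBbin, pvG_zero]
    | succ m =>
      rw [pvBbin, pvG]
      have h2 : 2 ^ (w + 1) = 2 * 2 ^ w := by ring
      have hlt : (m + 1) / 2 < 2 ^ w := Nat.div_lt_of_lt_mul (by omega)
      rw [← ih ((m + 1) / 2) hlt]
      simp only [List.length_append, List.length_cons, List.length_nil]
      rw [← List.append_assoc]
      congr 2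
      congr 1
      omega

-- A's loop from i = 0 produces exactly the translated fixed-width binary of the low n.toNat bits
theorem pvMain (d : Int) (w : Nat) :
    pvAchars d (w : Int) 0 = (pvG w (PySem.Int.mod d (2 ^ w)).toNat).map (fun c => if c == '1' then '#' else ' ') := by
  have h := pvAchars_eq_H d (w : Int) 0 le_rfl
  rw [h]
  have : ((w : Int) - 0).toNat = w := by omega
  rw [this]
  have : d >>> (0 : Int).toNat = d := by
    show d >>> (0 : Nat) = d
    simp [Int.shiftRight_eq_div_pow]
  rw [this, pvH_eq]

-- ===== VERDICT (by name: the statement is the Claim_ definition above) =====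
theorem convert_decimal_to_hash_and_spaces_spec : Claim_equal_convert_decimal_to_hash_and_spaces := by
  intro d n _
  unfold Spec_convert_decimal_to_hash_and_spaces
  unfold convert_decimal_to_hash_and_spaces convert_decimal_to_hash_and_spaces_alt
  rw [pvAgo_eq, List.append_nil]
  by_cases hn : n ≤ 0
  · simp only [hn, if_true]
    rw [pvAchars]
    simp [show ¬ ((0:Int) < n) by omega]
  · simp only [hn, if_false]
    have hw : n = ((n.toNat : Nat) : Int) := by omega
    have hw1 : 1 ≤ n.toNat := by omega
    have hsh : ((1 : Int) <<< n.toNat) = 2 ^ n.toNat := by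
      rw [Int.shiftLeft_eq]; ring
    conv_lhs => rw [hw]
    rw [pvMain d n.toNat, hsh]
    congr 1
    set m : Nat := (PySem.Int.mod d (2 ^ n.toNat)).toNat with hm
    have hmlt : m < 2 ^ n.toNat := by
      have h1 := PySem.Int.mod_lt d (show (0:Int) < 2 ^ n.toNat by positivity)
      have h2 := PySem.Int.mod_nonneg d (show (0:Int) < 2 ^ n.toNat by positivity)
      have : ((2 : Int) ^ n.toNat) = ((2 ^ n.toNat : Nat) : Int) := by push_cast; ring
      omega
    congr 1
    unfold pvBfmt
    by_cases h0 : m = 0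
    · simp only [h0, if_true]
      rw [pvG_zero]
      simp only [List.length_cons, List.length_nil]
      rw [← List.replicate_succ']
      congr 1
      omega
    · simp only [h0, if_false]
      exact (pvBbin_pad n.toNat m hmlt).symm
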